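-- pv_equiv track=rewrite | github.com/AlexO28/leet_code_problems | strong_password_checker.py | count_char_types
-- ===== SOURCE A (Python) =====
-- def count_char_types(s):
--     has_lower = 1
--     has_upper = 1
--     has_digit = 1
--     for elem in s:
--         if elem.islower():
--             has_lower = 0
--         elif elem.isupper():
--             has_upper = 0
--         elif elem.isdigit():
--             has_digit = 0
--     return has_lower + has_upper + has_digit
-- ===== SOURCE B (Python) =====
-- def count_char_types(s):
--     return ((not any(c.islower() for c in s))
--             + (not any(c.isupper() for c in s))
--             + (not any(c.isdigit() for c in s)))
-- ===== Notes on version B (the rewrite author's own statement) =====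
-- stated objective: idiomatic
-- what changed: Replaces the single flag-mutating elif loop with three independent any(...) presence scans whose negations are summed, relying on the mutual exclusivity of islower/isupper/isdigit.
import Mathlib
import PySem

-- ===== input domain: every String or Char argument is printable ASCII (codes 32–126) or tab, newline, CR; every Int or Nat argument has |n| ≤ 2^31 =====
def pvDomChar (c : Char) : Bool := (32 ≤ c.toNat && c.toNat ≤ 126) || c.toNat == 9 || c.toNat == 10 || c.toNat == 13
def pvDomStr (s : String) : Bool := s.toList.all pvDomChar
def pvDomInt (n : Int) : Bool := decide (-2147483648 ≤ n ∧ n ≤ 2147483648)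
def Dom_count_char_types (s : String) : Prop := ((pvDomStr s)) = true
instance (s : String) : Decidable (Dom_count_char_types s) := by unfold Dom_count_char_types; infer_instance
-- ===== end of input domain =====

-- B replaces A's single flag-setting elif loop with three independent presence scans (idiomatic).

-- ===== PORT A =====
-- the loop body: the elif chain updating the three flags (has_lower, has_upper, has_digit)
def cctStep (f : Int × Int × Int) (elem : Char) : Int × Int × Int :=
  if PySem.Chars.islower elem then (0, f.2.1, f.2.2)
  else if PySem.Chars.isupper elem then (f.1, 0, f.2.2)
  else if PySem.Chars.isdigit elem then (f.1, f.2.1, 0)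
  else f

def count_char_types (s : String) : Int :=
  let f := s.toList.foldl cctStep (1, 1, 1)
  f.1 + f.2.1 + f.2.2

-- ===== PORT B =====
def count_char_types_alt (s : String) : Int :=
  (if s.toList.any PySem.Chars.islower then 0 else 1) +
  (if s.toList.any PySem.Chars.isupper then 0 else 1) +
  (if s.toList.any PySem.Chars.isdigit then 0 else 1)

-- ===== PRECONDITION & SPEC =====
def Spec_count_char_types (s : String) (out : Int) : Prop := out = count_char_types_alt s
instance (s : String) (out : Int) : Decidable (Spec_count_char_types s out) := by unfold Spec_count_char_types; infer_instance

-- ===== CLAIM (what is proved, stated in full; the proofs are below) =====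
def Claim_equal_count_char_types : Prop := ∀ (s : String), Dom_count_char_types s → Spec_count_char_types s (count_char_types s)

-- ===== LEMMAS AND PROOFS =====

theorem cct_not_lu (c : Char) (h : PySem.Chars.islower c = true) :
    PySem.Chars.isupper c = false := by
  simp [PySem.Chars.islower, PySem.Chars.isupper, Char.le_def, UInt32.le_iff_toNat_le] at *
  omega

theorem cct_not_ld (c : Char) (h : PySem.Chars.islower c = true) :
    PySem.Chars.isdigit c = false := by
  simp [PySem.Chars.islower, PySem.Chars.isdigit, Char.le_def, UInt32.le_iff_toNat_le] at *
  omega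

theorem cct_not_ud (c : Char) (h : PySem.Chars.isupper c = true) :
    PySem.Chars.isdigit c = false := by
  simp [PySem.Chars.isupper, PySem.Chars.isdigit, Char.le_def, UInt32.le_iff_toNat_le] at *
  omega

theorem cct_fold (l : List Char) (a b c : Int) :
    l.foldl cctStep (a, b, c) =
      ((if l.any PySem.Chars.islower then 0 else a),
       (if l.any PySem.Chars.isupper then 0 else b),
       (if l.any PySem.Chars.isdigit then 0 else c)) := by
  induction l generalizing a b c with
  | nil => simp
  | cons x l ih =>
    simp only [List.foldl_cons, List.any_cons]
    by_cases hl : PySem.Chars.islower x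
    · simp [cctStep, hl, cct_not_lu x hl, cct_not_ld x hl, ih]
    · by_cases hu : PySem.Chars.isupper x
      · simp [cctStep, hl, hu, cct_not_ud x hu, ih]
      · by_cases hd : PySem.Chars.isdigit x
        · simp [cctStep, hl, hu, hd, ih]
        · simp [cctStep, hl, hu, hd, ih]

-- ===== VERDICT (by name: the statement is the Claim_ definition above) =====
theorem count_char_types_spec : Claim_equal_count_char_types := by
  intro s _
  unfold Spec_count_char_types count_char_types count_char_types_alt
  simp [cct_fold]
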